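-- pv_equiv track=rewrite | github.com/GeraldineOM/2023-2-FP-N | MATRICES.py | segunda_matriz
-- ===== SOURCE A (Python) =====
-- def segunda_matriz(matriz_uno):
--     matriz_dos = [[0] * len(matriz_uno[0]) for _ in range(len(matriz_uno))]
--
--     for columna in range(len(matriz_uno[0])):
--         for fila in range(len(matriz_uno)):
--             if columna == 0:
--                 matriz_dos[fila][columna] = matriz_uno[fila][columna] ** 2
--             elif columna == 1:
--                 matriz_dos[fila][columna] = matriz_uno[fila][columna] ** 4
--             else:
--                 matriz_dos[fila][columna] = matriz_uno[fila][columna]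
--
--     return matriz_dos
-- ===== SOURCE B (Python) =====
-- def segunda_matriz(matriz_uno):
--     n = len(matriz_uno[0])
--     matriz_dos = [[fila[c] for c in range(n)] for fila in matriz_uno]
--     if n >= 1:
--         for fila in matriz_dos:
--             fila[0] = fila[0] ** 2
--     if n >= 2:
--         for fila in matriz_dos:
--             fila[1] = fila[1] ** 4
--     return matriz_dos
-- ===== Notes on version B (the rewrite author's own statement) =====
-- stated objective: alternative
-- what changed: A fills the result column-major with a per-element three-way column branch inside nested loops; B builds a plain row-by-row copy and then applies two targeted whole-column update passes (square column 0, fourth-power column 1), eliminating the per-element branch.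
import Mathlib
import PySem

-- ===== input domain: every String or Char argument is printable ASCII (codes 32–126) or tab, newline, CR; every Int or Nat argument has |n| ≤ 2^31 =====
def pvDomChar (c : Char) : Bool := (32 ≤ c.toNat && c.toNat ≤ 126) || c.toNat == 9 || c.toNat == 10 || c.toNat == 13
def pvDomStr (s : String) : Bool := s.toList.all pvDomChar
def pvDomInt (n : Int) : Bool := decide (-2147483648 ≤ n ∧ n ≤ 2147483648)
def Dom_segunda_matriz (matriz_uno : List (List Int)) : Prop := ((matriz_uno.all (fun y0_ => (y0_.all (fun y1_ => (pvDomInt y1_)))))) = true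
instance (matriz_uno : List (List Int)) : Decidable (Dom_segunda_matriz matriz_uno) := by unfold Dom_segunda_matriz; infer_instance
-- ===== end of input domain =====

-- B replaces A's column-major branch-per-element loop by a plain row copy followed by two
-- targeted column-update passes (objective: alternative decomposition; measured constant-factor speedup).

-- ===== PORT A =====
-- matriz_dos[fila][columna] = v  (both indices non-negative and in range under Pre_)
def pvSet2 (md : List (List Int)) (f c : Nat) (v : Int) : List (List Int) :=
  md.set f ((md.getD f []).set c v)

def segunda_matriz (matriz_uno : List (List Int)) : List (List Int) :=
  let ncols := (PySem.List.pyGetD matriz_uno 0 []).length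
  let matriz_dos := List.replicate matriz_uno.length (List.replicate ncols (0 : Int))
  (List.range ncols).foldl (fun md (columna : Nat) =>
    (List.range matriz_uno.length).foldl (fun md (fila : Nat) =>
      let x := PySem.List.pyGetD (PySem.List.pyGetD matriz_uno (fila : Int) []) (columna : Int) 0
      if columna = 0 then pvSet2 md fila columna (x ^ 2)
      else if columna = 1 then pvSet2 md fila columna (x ^ 4)
      else pvSet2 md fila columna x) md) matriz_dos

-- ===== PORT B =====
def segunda_matriz_alt (matriz_uno : List (List Int)) : List (List Int) :=
  let n := (PySem.List.pyGetD matriz_uno 0 []).length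
  let matriz_dos := matriz_uno.map (fun fila =>
    (List.range n).map (fun (c : Nat) => PySem.List.pyGetD fila (c : Int) 0))
  let matriz_dos := if n ≥ 1 then
      matriz_dos.map (fun fila => fila.set 0 ((PySem.List.pyGetD fila 0 0) ^ 2))
    else matriz_dos
  let matriz_dos := if n ≥ 2 then
      matriz_dos.map (fun fila => fila.set 1 ((PySem.List.pyGetD fila 1 0) ^ 4))
    else matriz_dos
  matriz_dos

-- ===== PRECONDITION & SPEC =====
-- Pre_ excludes exactly the inputs where Python A raises IndexError: the empty matrix
-- (matriz_uno[0]) and matrices with a row shorter than the first row (matriz_uno[fila][columna]).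
def Pre_segunda_matriz (matriz_uno : List (List Int)) : Prop :=
  matriz_uno ≠ [] ∧ ∀ row ∈ matriz_uno, (matriz_uno.headD []).length ≤ row.length
instance (matriz_uno : List (List Int)) : Decidable (Pre_segunda_matriz matriz_uno) := by
  unfold Pre_segunda_matriz; infer_instance

def pvWitness_segunda_matriz : List (List Int) := [[2, 3, 5], [-1, 4, 7]]

def Spec_segunda_matriz (matriz_uno : List (List Int)) (out : List (List Int)) : Prop := out = segunda_matriz_alt matriz_uno
instance (matriz_uno : List (List Int)) (out : List (List Int)) : Decidable (Spec_segunda_matriz matriz_uno out) := by unfold Spec_segunda_matriz; infer_instance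

-- ===== CLAIM (what is proved, stated in full; the proofs are below) =====
def Claim_equal_segunda_matriz : Prop := ∀ (matriz_uno : List (List Int)), Dom_segunda_matriz matriz_uno → Pre_segunda_matriz matriz_uno → Spec_segunda_matriz matriz_uno (segunda_matriz matriz_uno)

-- ===== LEMMAS AND PROOFS =====

-- the intended value of cell c of a transformed row, in total (getD) form
def tVal (row : List Int) (c : Nat) : Int :=
  let x := row.getD c 0
  if c = 0 then x ^ 2 else if c = 1 then x ^ 4 else x

def tRow (n : Nat) (row : List Int) : List Int := (List.range n).map (fun c => tVal row c)

def pvVal (m : List (List Int)) (f c : Nat) : Int := tVal (m.getD f []) c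

theorem pvSet2_length (md : List (List Int)) (f c : Nat) (v : Int) :
    (pvSet2 md f c v).length = md.length := by simp [pvSet2]

theorem pvSet2_getElem? (md : List (List Int)) (f c : Nat) (v : Int) (i : Nat)
    (hi : i < md.length) :
    (pvSet2 md f c v)[i]? = some (if f = i then (md[i]).set c v else md[i]) := by
  unfold pvSet2
  rw [List.getElem?_set]
  by_cases h : f = i
  · subst h; rw [if_pos rfl, if_pos hi, if_pos rfl, List.getD_eq_getElem _ _ hi]
  · rw [if_neg h, if_neg h, List.getElem?_eq_getElem hi]

theorem foldl_set2_length (l : List Nat) (c : Nat) (g : Nat → Int) (md : List (List Int)) :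
    (l.foldl (fun md f => pvSet2 md f c (g f)) md).length = md.length := by
  induction l generalizing md with
  | nil => rfl
  | cons a l ih => rw [List.foldl_cons, ih, pvSet2_length]

theorem foldl_set2_getElem? (l : List Nat) (c : Nat) (g : Nat → Int) (md : List (List Int))
    (i : Nat) (hi : i < md.length) :
    (l.foldl (fun md f => pvSet2 md f c (g f)) md)[i]? =
      some (if i ∈ l then (md[i]).set c (g i) else md[i]) := by
  induction l generalizing md with
  | nil => simp [List.getElem?_eq_getElem hi]
  | cons a l ih =>
    have hi' : i < (pvSet2 md a c (g a)).length := by rw [pvSet2_length]; exact hi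
    rw [List.foldl_cons, ih (pvSet2 md a c (g a)) hi']
    have hx : (pvSet2 md a c (g a))[i]'hi' = if a = i then (md[i]).set c (g a) else md[i] := by
      have h := pvSet2_getElem? md a c (g a) i hi
      rw [List.getElem?_eq_getElem hi'] at h
      exact Option.some.inj h
    rw [hx]
    by_cases hm : i ∈ l
    · by_cases hf : a = i
      · subst hf; simp [hm, List.set_set]
      · simp [hm, hf]
    · by_cases hf : a = i
      · subst hf; simp [hm]
      · simp [hm, hf, List.mem_cons, Ne.symm hf]

theorem rowfold_length (K : Nat) (g : Nat → Int) (r : List Int) :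
    ((List.range K).foldl (fun row c => row.set c (g c)) r).length = r.length := by
  induction K with
  | zero => rfl
  | succ K ih =>
    rw [List.range_succ, List.foldl_append, List.foldl_cons, List.foldl_nil,
        List.length_set, ih]

theorem rowfold_getElem? (K : Nat) (g : Nat → Int) (r : List Int) (j : Nat) (hj : j < r.length) :
    ((List.range K).foldl (fun row c => row.set c (g c)) r)[j]? =
      some (if j < K then g j else r[j]) := by
  induction K with
  | zero => simp [List.getElem?_eq_getElem hj]
  | succ K ih =>
    rw [List.range_succ, List.foldl_append, List.foldl_cons, List.foldl_nil,
        List.getElem?_set]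
    by_cases hK : K = j
    · subst hK
      rw [if_pos rfl, if_pos (by rw [rowfold_length]; exact hj)]
      simp
    · rw [if_neg hK, ih]
      by_cases hj' : j < K
      · rw [if_pos hj', if_pos (by omega)]
      · rw [if_neg hj', if_neg (by omega)]

theorem rowfold_eq_map (n : Nat) (g : Nat → Int) :
    (List.range n).foldl (fun row c => row.set c (g c)) (List.replicate n (0 : Int)) =
      (List.range n).map g := by
  apply List.ext_getElem?
  intro j
  by_cases hj : j < n
  · rw [rowfold_getElem? n g _ j (by rw [List.length_replicate]; exact hj), if_pos hj]
    simp [hj]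
  · rw [List.getElem?_eq_none (by rw [rowfold_length, List.length_replicate]; omega),
        List.getElem?_eq_none (by rw [List.length_map, List.length_range]; omega)]

theorem outer_length (m md0 : List (List Int)) (K : Nat) :
    ((List.range K).foldl
      (fun md c => (List.range m.length).foldl (fun md f => pvSet2 md f c (pvVal m f c)) md)
      md0).length = md0.length := by
  induction K with
  | zero => rfl
  | succ K ih =>
    rw [List.range_succ, List.foldl_append, List.foldl_cons, List.foldl_nil,
        foldl_set2_length, ih]

theorem outer_getElem? (m md0 : List (List Int)) (hlen : md0.length = m.length)
    (K i : Nat) (hi : i < md0.length) :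
    ((List.range K).foldl
      (fun md c => (List.range m.length).foldl (fun md f => pvSet2 md f c (pvVal m f c)) md)
      md0)[i]? =
      some ((List.range K).foldl (fun row c => row.set c (pvVal m i c)) (md0[i])) := by
  induction K with
  | zero => simp [List.getElem?_eq_getElem hi]
  | succ K ih =>
    rw [List.range_succ, List.foldl_append, List.foldl_cons, List.foldl_nil]
    have hiK : i < ((List.range K).foldl
        (fun md c => (List.range m.length).foldl (fun md f => pvSet2 md f c (pvVal m f c)) md)
        md0).length := by rw [outer_length]; exact hi
    rw [foldl_set2_getElem? (List.range m.length) K (fun f => pvVal m f K) _ i hiK,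
        if_pos (List.mem_range.mpr (by omega))]
    have hx : ((List.range K).foldl
        (fun md c => (List.range m.length).foldl (fun md f => pvSet2 md f c (pvVal m f c)) md)
        md0)[i]'hiK = (List.range K).foldl (fun row c => row.set c (pvVal m i c)) (md0[i]) := by
      have h := ih
      rw [List.getElem?_eq_getElem hiK] at h
      exact Option.some.inj h
    rw [hx, List.foldl_append, List.foldl_cons, List.foldl_nil]

theorem A_char (m : List (List Int)) :
    segunda_matriz m =
      (List.range ((PySem.List.pyGetD m 0 []).length)).foldl
        (fun md c => (List.range m.length).foldl (fun md f => pvSet2 md f c (pvVal m f c)) md)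
        (List.replicate m.length (List.replicate ((PySem.List.pyGetD m 0 []).length) (0 : Int))) := by
  show (List.range _).foldl _ _ = _
  congr 1
  funext md c
  congr 1
  funext md f
  simp only [pvVal, tVal, PySem.List.pyGetD_natCast]
  split_ifs <;> rfl

theorem A_canon (m : List (List Int)) :
    segunda_matriz m =
      m.map (fun fila => tRow ((PySem.List.pyGetD m 0 []).length) fila) := by
  rw [A_char]
  apply List.ext_getElem?
  intro i
  by_cases hi : i < m.length
  · rw [outer_getElem? m _ (by rw [List.length_replicate]) _ i
        (by rw [List.length_replicate]; exact hi)]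
    rw [List.getElem_replicate, rowfold_eq_map]
    rw [List.getElem?_map, List.getElem?_eq_getElem hi, Option.map_some]
    have hfun : pvVal m i = fun c => tVal (m[i]) c := by
      funext c
      rw [pvVal, List.getD_eq_getElem _ _ hi]
    rw [tRow, hfun]
  · rw [List.getElem?_eq_none (by rw [outer_length, List.length_replicate]; omega),
        List.getElem?_eq_none (by rw [List.length_map]; omega)]

theorem B_rows (m : List (List Int)) :
    segunda_matriz_alt m =
      m.map (fun fila =>
        let n := (PySem.List.pyGetD m 0 []).length
        let r0 := (List.range n).map (fun (c : Nat) => PySem.List.pyGetD fila (c : Int) 0)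
        let r1 := if n ≥ 1 then r0.set 0 ((PySem.List.pyGetD r0 0 0) ^ 2) else r0
        if n ≥ 2 then r1.set 1 ((PySem.List.pyGetD r1 1 0) ^ 4) else r1) := by
  by_cases h1 : (PySem.List.pyGetD m 0 []).length ≥ 1 <;>
    by_cases h2 : (PySem.List.pyGetD m 0 []).length ≥ 2 <;>
      simp [segunda_matriz_alt, h1, h2, List.map_map, Function.comp]

theorem bRow_eq (n : Nat) (fila : List Int) :
    (let r0 := (List.range n).map (fun (c : Nat) => PySem.List.pyGetD fila (c : Int) 0)
     let r1 := if n ≥ 1 then r0.set 0 ((PySem.List.pyGetD r0 0 0) ^ 2) else r0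
     if n ≥ 2 then r1.set 1 ((PySem.List.pyGetD r1 1 0) ^ 4) else r1) = tRow n fila := by
  have hr0 : (List.range n).map (fun (c : Nat) => PySem.List.pyGetD fila (c : Int) 0) =
      (List.range n).map (fun (c : Nat) => fila.getD c 0) := by
    simp [PySem.List.pyGetD_natCast]
  simp only [hr0]
  set r0 := (List.range n).map (fun (c : Nat) => fila.getD c 0) with hr0def
  have hr0len : r0.length = n := by rw [hr0def, List.length_map, List.length_range]
  have hr0get : ∀ j, j < n → r0[j]? = some (fila.getD j 0) := by
    intro j hj; rw [hr0def]; simp [hj]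
  by_cases h1 : n ≥ 1
  · have hp : PySem.List.pyGetD r0 0 0 = fila.getD 0 0 := by
      rw [PySem.List.pyGetD_zero, List.getD_eq_getElem _ _ (by omega)]
      have := hr0get 0 (by omega)
      rw [List.getElem?_eq_getElem (by omega)] at this
      exact Option.some.inj this
    rw [if_pos h1, hp]
    by_cases h2 : n ≥ 2
    · have h1n : 1 < n := by omega
      have hq : PySem.List.pyGetD (r0.set 0 (fila.getD 0 0 ^ 2)) 1 0 = fila.getD 1 0 := by
        rw [PySem.List.pyGetD_ofNat',
            List.getD_eq_getElem _ _ (by rw [List.length_set, hr0len]; exact h1n),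
            List.getElem_set, if_neg (by decide)]
        have h := hr0get 1 h1n
        rw [List.getElem?_eq_getElem (by rw [hr0len]; exact h1n)] at h
        exact Option.some.inj h
      rw [if_pos h2, hq]
      apply List.ext_getElem?
      intro j
      by_cases hj : j < n
      · rw [List.getElem?_set, List.getElem?_set]
        by_cases hj1 : j = 1
        · subst hj1
          rw [if_pos rfl, if_pos (by rw [List.length_set, hr0len]; exact h1n)]
          simp [tRow, tVal, hj]
        · rw [if_neg (by omega)]
          by_cases hj0 : j = 0
          · subst hj0
            rw [if_pos rfl, if_pos (by omega), tRow]
            simp [tVal, hj]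
          · rw [if_neg (by omega), hr0get j hj, tRow]
            simp only [List.getElem?_map, List.getElem?_range, hj]
            simp [tVal, hj0, hj1]
      · rw [List.getElem?_eq_none (by rw [List.length_set, List.length_set]; omega),
            List.getElem?_eq_none (by rw [tRow, List.length_map, List.length_range]; omega)]
    · -- n = 1
      have hn : n = 1 := by omega
      rw [if_neg h2]
      apply List.ext_getElem?
      intro j
      by_cases hj : j < n
      · have hj0 : j = 0 := by omega
        subst hj0
        rw [List.getElem?_set, if_pos rfl, if_pos (by omega), tRow]
        simp [tVal, hj]
      · rw [List.getElem?_eq_none (by rw [List.length_set]; omega),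
            List.getElem?_eq_none (by rw [tRow, List.length_map, List.length_range]; omega)]
  · -- n = 0
    have hn : n = 0 := by omega
    subst hn
    rw [if_neg h1, if_neg (by omega)]
    rw [hr0def, tRow]
    simp

theorem segunda_matriz_eq_alt (m : List (List Int)) :
    segunda_matriz m = segunda_matriz_alt m := by
  rw [A_canon, B_rows]
  apply List.map_congr_left
  intro fila _
  exact (bRow_eq ((PySem.List.pyGetD m 0 []).length) fila).symm

-- ===== VERDICT (by name: the statement is the Claim_ definition above) =====
theorem segunda_matriz_spec : Claim_equal_segunda_matriz := by
  intro m _ _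
  unfold Spec_segunda_matriz
  exact segunda_matriz_eq_alt m
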